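-- pv_equiv track=rewrite | github.com/CherryQqqqq5/training-free | scripts/check_explicit_obligation_smoke_executability.py | _expand_deps
-- ===== SOURCE A (Python) =====
-- from typing import Any
--
-- def _expand_deps(case_id: str, entries_by_id: dict[str, dict[str, Any]]) -> tuple[list[str], list[str]]:
--     expanded: list[str] = []
--     missing: list[str] = []
--     seen: set[str] = set()
--
--     def add(item_id: str) -> None:
--         if item_id in seen:
--             return
--         seen.add(item_id)
--         entry = entries_by_id.get(item_id)
--         if entry is None:
--             missing.append(item_id)
--             return
--         for dep_id in entry.get("depends_on") or []:
--             add(str(dep_id))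
--         expanded.append(item_id)
--
--     add(case_id)
--     return expanded, sorted(set(missing))
-- ===== SOURCE B (Python) =====
-- def _expand_deps(case_id, entries_by_id):
--     expanded = []
--     missing = []
--     seen = set()
--
--     def deps_of(item_id):
--         entry = entries_by_id.get(item_id)
--         if entry is None:
--             return None
--         return [str(d) for d in (entry.get("depends_on") or [])]
--
--     seen.add(case_id)
--     root_deps = deps_of(case_id)
--     if root_deps is None:
--         missing.append(case_id)
--     else:
--         stack = [(case_id, root_deps)]
--         while stack:
--             node_id, rest = stack[-1]
--             if rest:
--                 d = rest[0]
--                 stack[-1] = (node_id, rest[1:])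
--                 if d in seen:
--                     continue
--                 seen.add(d)
--                 child_deps = deps_of(d)
--                 if child_deps is None:
--                     missing.append(d)
--                 else:
--                     stack.append((d, child_deps))
--             else:
--                 expanded.append(node_id)
--                 stack.pop()
--     return expanded, sorted(set(missing))
-- ===== Notes on version B (the rewrite author's own statement) =====
-- stated objective: alternative
-- what changed: Replaces A's recursive nested closure (post-order DFS by recursion) with an iterative DFS over an explicit stack of (node, remaining-deps) frames, marking nodes seen on entry and emitting them when their frame is exhausted.
import Mathlib
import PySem

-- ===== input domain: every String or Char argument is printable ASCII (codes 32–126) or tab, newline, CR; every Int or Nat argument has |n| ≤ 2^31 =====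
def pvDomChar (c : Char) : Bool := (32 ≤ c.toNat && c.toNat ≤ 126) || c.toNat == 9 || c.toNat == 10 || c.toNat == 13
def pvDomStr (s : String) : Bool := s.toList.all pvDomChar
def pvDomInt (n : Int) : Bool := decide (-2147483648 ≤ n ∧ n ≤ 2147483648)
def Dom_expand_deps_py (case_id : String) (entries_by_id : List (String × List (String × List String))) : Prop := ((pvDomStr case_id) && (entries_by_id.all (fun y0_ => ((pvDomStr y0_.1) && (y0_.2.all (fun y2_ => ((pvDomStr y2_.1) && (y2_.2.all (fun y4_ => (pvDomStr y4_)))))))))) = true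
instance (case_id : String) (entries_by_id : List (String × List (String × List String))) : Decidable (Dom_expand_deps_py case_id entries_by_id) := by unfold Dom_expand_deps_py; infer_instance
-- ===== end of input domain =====

-- B replaces A's recursive nested closure by an iterative DFS over an explicit stack of
-- (node, remaining-deps) frames; same return value, different control structure (objective: alternative).
-- The Nat fuel in both ports is only a totality guard (each descent enters a distinct key,
-- so `entries_by_id.length + 1` can never run out); it mirrors no Python construct.

-- shared primitive: Python dict.get on an association list (first match)
def pvLookup {α : Type} : List (String × α) → String → Option α
  | [], _ => none
  | (k, v) :: rest, x => if k == x then some v else pvLookup rest x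

-- entry.get("depends_on") or []
def pvDeps (entry : List (String × List String)) : List String :=
  (pvLookup entry "depends_on").getD []

structure PvSt where
  expanded : List String
  missing : List String
  seen : PySem.Set String

-- ===== PORT A =====
-- the recursive closure `add`
def pvAddA (entries : List (String × List (String × List String))) : Nat → String → PvSt → PvSt
  | 0, _, st => st
  | n + 1, item, st =>
    if PySem.Set.contains st.seen item then st
    else
      let st1 : PvSt := ⟨st.expanded, st.missing, PySem.Set.add st.seen item⟩
      match pvLookup entries item with
      | none => ⟨st1.expanded, st1.missing ++ [item], st1.seen⟩
      | some entry =>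
        let st2 := (pvDeps entry).foldl (fun s d => pvAddA entries n d s) st1
        ⟨st2.expanded ++ [item], st2.missing, st2.seen⟩

def expand_deps_py (case_id : String) (entries_by_id : List (String × List (String × List String))) : List String × List String :=
  let st := pvAddA entries_by_id (entries_by_id.length + 1) case_id ⟨[], [], PySem.Set.empty⟩
  (st.expanded, PySem.List.sorted (PySem.Set.ofList st.missing) (fun x => x) false)

-- ===== PORT B =====
-- the while-loop over the explicit stack of (node_id, remaining deps) frames
def pvRunB (entries : List (String × List (String × List String))) : Nat → List (String × List String) → PvSt → PvSt
  | _, [], st => st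
  | n, (id, []) :: stk, st => pvRunB entries n stk ⟨st.expanded ++ [id], st.missing, st.seen⟩
  | n, (id, d :: rest) :: stk, st =>
    if PySem.Set.contains st.seen d then pvRunB entries n ((id, rest) :: stk) st
    else
      let st1 : PvSt := ⟨st.expanded, st.missing, PySem.Set.add st.seen d⟩
      match pvLookup entries d with
      | none => pvRunB entries n ((id, rest) :: stk) ⟨st1.expanded, st1.missing ++ [d], st1.seen⟩
      | some entry =>
        match n with
        | 0 => st1
        | m + 1 => pvRunB entries m ((d, pvDeps entry) :: (id, rest) :: stk) st1
termination_by n stk _ => (n, (stk.map (fun f => f.2.length + 1)).sum)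
decreasing_by
  all_goals first
    | (apply Prod.Lex.left; omega)
    | (apply Prod.Lex.right; simp)

def expand_deps_py_alt (case_id : String) (entries_by_id : List (String × List (String × List String))) : List String × List String :=
  let seen0 : PySem.Set String := PySem.Set.add PySem.Set.empty case_id
  let st : PvSt :=
    match pvLookup entries_by_id case_id with
    | none => ⟨[], [case_id], seen0⟩
    | some entry =>
      pvRunB entries_by_id (entries_by_id.length + 1) [(case_id, pvDeps entry)] ⟨[], [], seen0⟩
  (st.expanded, PySem.List.sorted (PySem.Set.ofList st.missing) (fun x => x) false)

-- ===== PRECONDITION & SPEC =====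
def Spec_expand_deps_py (case_id : String) (entries_by_id : List (String × List (String × List String))) (out : List String × List String) : Prop := out = expand_deps_py_alt case_id entries_by_id
instance (case_id : String) (entries_by_id : List (String × List (String × List String))) (out : List String × List String) : Decidable (Spec_expand_deps_py case_id entries_by_id out) := by unfold Spec_expand_deps_py; infer_instance

-- ===== CLAIM (what is proved, stated in full; the proofs are below) =====
def Claim_equal_expand_deps_py : Prop := ∀ (case_id : String) (entries_by_id : List (String × List (String × List String))), Dom_expand_deps_py case_id entries_by_id → Spec_expand_deps_py case_id entries_by_id (expand_deps_py case_id entries_by_id)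

-- ===== LEMMAS AND PROOFS =====

-- the measure: number of entry keys not yet seen
def pvC (entries : List (String × List (String × List String))) (st : PvSt) : Nat :=
  ((entries.map Prod.fst).toFinset \ st.seen.toFinset).card

theorem pvLookup_mem_keys {α : Type} {l : List (String × α)} {x : String} {v : α}
    (h : pvLookup l x = some v) : x ∈ l.map Prod.fst := by
  induction l with
  | nil => simp [pvLookup] at h
  | cons p rest ih =>
    obtain ⟨k, w⟩ := p
    by_cases hk : k == x
    · simp_all [pvLookup]
    · simp [pvLookup, hk] at h
      simpa using Or.inr (ih h)

theorem pvC_anti (entries : List (String × List (String × List String))) {st st' : PvSt}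
    (h : ∀ x, x ∈ st.seen → x ∈ st'.seen) : pvC entries st' ≤ pvC entries st := by
  apply Finset.card_le_card
  intro x hx
  simp only [Finset.mem_sdiff, List.mem_toFinset] at hx ⊢
  exact ⟨hx.1, fun hm => hx.2 (h x hm)⟩

theorem pvC_add_lt (entries : List (String × List (String × List String))) (st : PvSt)
    {item : String} (hk : item ∈ entries.map Prod.fst) (hns : item ∉ st.seen) :
    pvC entries ⟨st.expanded, st.missing, PySem.Set.add st.seen item⟩ < pvC entries st := by
  apply Finset.card_lt_card
  constructor
  · intro x hx
    simp only [Finset.mem_sdiff, List.mem_toFinset, PySem.Set.mem_add] at hx ⊢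
    exact ⟨hx.1, fun hm => hx.2 (Or.inl hm)⟩
  · intro hsub
    have : item ∈ (entries.map Prod.fst).toFinset \ st.seen.toFinset := by
      simp [Finset.mem_sdiff, List.mem_toFinset, hk, hns]
    have := hsub this
    simp [Finset.mem_sdiff, PySem.Set.mem_add] at this

theorem pvFold_seen_mono (entries : List (String × List (String × List String))) (n : Nat)
    (ih : ∀ item st x, x ∈ st.seen → x ∈ (pvAddA entries n item st).seen) :
    ∀ (l : List String) (st : PvSt) (x : String), x ∈ st.seen →
      x ∈ (l.foldl (fun s d => pvAddA entries n d s) st).seen := by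
  intro l
  induction l with
  | nil => intro st x h; simpa using h
  | cons d rest ihl => intro st x h; exact ihl _ _ (ih d st x h)

theorem pvAddA_seen_mono (entries : List (String × List (String × List String))) :
    ∀ n item st x, x ∈ st.seen → x ∈ (pvAddA entries n item st).seen := by
  intro n
  induction n with
  | zero => intro item st x h; simpa [pvAddA] using h
  | succ n ih =>
    intro item st x h
    by_cases hc : item ∈ st.seen
    · simpa [pvAddA, hc] using h
    · cases hlk : pvLookup entries item with
      | none => simpa [pvAddA, hc, hlk, PySem.Set.mem_add] using Or.inl h
      | some e =>
        simp only [pvAddA, hlk]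
        rw [if_neg (by simpa [PySem.Set.contains_iff] using hc)]
        exact pvFold_seen_mono entries n ih _ _ x (by simpa [PySem.Set.mem_add] using Or.inl h)

theorem pvC_anti_addA (entries : List (String × List (String × List String)))
    (n : Nat) (d : String) (st : PvSt) :
    pvC entries (pvAddA entries n d st) ≤ pvC entries st :=
  pvC_anti entries (fun x hx => pvAddA_seen_mono entries n d st x hx)

theorem pvAddA_adeq (entries : List (String × List (String × List String))) :
    ∀ n m item st, pvC entries st + 1 ≤ n → pvC entries st + 1 ≤ m →
      pvAddA entries n item st = pvAddA entries m item st := by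
  intro n
  induction n with
  | zero => intro m item st h1 _; omega
  | succ n ih =>
    intro m item st h1 h2
    cases m with
    | zero => omega
    | succ m =>
      by_cases hc : item ∈ st.seen
      · simp [pvAddA, hc]
      · cases hlk : pvLookup entries item with
        | none => simp [pvAddA, hlk]
        | some e =>
          have hcb : ¬ (PySem.Set.contains st.seen item = true) := by
            simpa [PySem.Set.contains_iff] using hc
          simp only [pvAddA, hlk]
          rw [if_neg hcb, if_neg hcb]
          have hkey : item ∈ entries.map Prod.fst := pvLookup_mem_keys hlk
          have hlt : pvC entries ⟨st.expanded, st.missing, PySem.Set.add st.seen item⟩ < pvC entries st :=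
            pvC_add_lt entries st hkey hc
          have hfold : ∀ (deps : List String) (s0 : PvSt), pvC entries s0 + 1 ≤ n → pvC entries s0 + 1 ≤ m →
              deps.foldl (fun s d => pvAddA entries n d s) s0 = deps.foldl (fun s d => pvAddA entries m d s) s0 := by
            intro deps
            induction deps with
            | nil => intros; rfl
            | cons d rest ihd =>
              intro s0 hn hm
              simp only [List.foldl_cons]
              rw [← ih m d s0 hn hm]
              have hle := pvC_anti_addA entries n d s0
              exact ihd _ (by omega) (by omega)
          rw [hfold (pvDeps e) _ (by omega) (by omega)]

theorem pvSeen_add_sub (entries : List (String × List (String × List String)))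
    (st : PvSt) (d : String) :
    pvC entries ({ expanded := st.expanded, missing := st.missing, seen := st.seen.add d } : PvSt) ≤ pvC entries st :=
  pvC_anti entries (fun x hx => by simpa [PySem.Set.mem_add] using Or.inl hx)

theorem pvRunB_adeq (entries : List (String × List (String × List String))) :
    ∀ n stk st, ∀ m, pvC entries st + 1 ≤ n → pvC entries st + 1 ≤ m →
      pvRunB entries n stk st = pvRunB entries m stk st := by
  intro n stk st
  induction n, stk, st using pvRunB.induct entries with
  | case1 n st => intro m _ _; simp [pvRunB]
  | case2 n id stk st ih =>
    intro m h1 h2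
    simp only [pvRunB]
    exact ih m h1 h2
  | case3 n id d rest stk st hc ih =>
    intro m h1 h2
    simp only [pvRunB]
    rw [if_pos hc, if_pos hc]
    exact ih m h1 h2
  | case4 n id d rest stk st hc st1 hlk ih =>
    intro m h1 h2
    simp only [pvRunB]
    rw [if_neg hc, if_neg hc, hlk]
    have hle := pvSeen_add_sub entries st d
    have heq : pvC entries ({ expanded := st1.expanded, missing := st1.missing ++ [d], seen := st1.seen } : PvSt)
        = pvC entries ({ expanded := st.expanded, missing := st.missing, seen := st.seen.add d } : PvSt) := rfl
    exact ih m (by omega) (by omega)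
  | case5 id d rest stk st hc entry hlk =>
    intro m h1 h2
    omega
  | case6 id d rest stk st hc st1 entry hlk m ih =>
    intro m2 h1 h2
    cases m2 with
    | zero => omega
    | succ m2 =>
      simp only [pvRunB]
      rw [if_neg hc, if_neg hc, hlk]
      have hkey : d ∈ entries.map Prod.fst := pvLookup_mem_keys hlk
      have hcm : d ∉ st.seen := by simpa [PySem.Set.contains_iff] using hc
      have hlt : pvC entries ⟨st.expanded, st.missing, PySem.Set.add st.seen d⟩ < pvC entries st :=
        pvC_add_lt entries st hkey hcm
      have heq : pvC entries st1
          = pvC entries ({ expanded := st.expanded, missing := st.missing, seen := st.seen.add d } : PvSt) := rfl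
      exact ih m2 (by omega) (by omega)

theorem pvBridge (entries : List (String × List (String × List String))) :
    ∀ n id deps stk st, pvC entries st + 1 ≤ n →
      pvRunB entries n ((id, deps) :: stk) st
        = pvRunB entries n stk
            (let st2 := deps.foldl (fun s d => pvAddA entries n d s) st
             ⟨st2.expanded ++ [id], st2.missing, st2.seen⟩) := by
  intro n
  induction n with
  | zero => intro id deps stk st h; omega
  | succ k ihn =>
    intro id deps stk st
    induction deps generalizing st with
    | nil =>
      intro h
      simp [pvRunB]
    | cons d rest ihd =>
      intro h
      by_cases hc : d ∈ st.seen
      · have hcb : st.seen.contains d = true := by simpa [PySem.Set.contains_iff] using hc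
        have hskip : pvAddA entries (k + 1) d st = st := by simp [pvAddA, hc]
        simp only [pvRunB]
        rw [if_pos hcb]
        simp only [List.foldl_cons, hskip]
        exact ihd st h
      · have hcb : ¬ st.seen.contains d = true := by simpa [PySem.Set.contains_iff] using hc
        cases hlk : pvLookup entries d with
        | none =>
          have hstep : pvAddA entries (k + 1) d st
              = ⟨st.expanded, st.missing ++ [d], PySem.Set.add st.seen d⟩ := by
            simp only [pvAddA, hlk]
            rw [if_neg hcb]
          simp only [pvRunB]
          rw [if_neg hcb, hlk]
          simp only [List.foldl_cons, hstep]
          have hle := pvSeen_add_sub entries st d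
          exact ihd _ (by
            have heq : pvC entries ({ expanded := st.expanded, missing := st.missing ++ [d], seen := PySem.Set.add st.seen d } : PvSt)
                = pvC entries ({ expanded := st.expanded, missing := st.missing, seen := st.seen.add d } : PvSt) := rfl
            omega)
        | some e =>
          have hkey : d ∈ entries.map Prod.fst := pvLookup_mem_keys hlk
          have hlt : pvC entries ⟨st.expanded, st.missing, PySem.Set.add st.seen d⟩ < pvC entries st :=
            pvC_add_lt entries st hkey hc
          have hstep : pvAddA entries (k + 1) d st
              = (let st2 := (pvDeps e).foldl (fun s d => pvAddA entries k d s)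
                    ⟨st.expanded, st.missing, PySem.Set.add st.seen d⟩
                 (⟨st2.expanded ++ [d], st2.missing, st2.seen⟩ : PvSt)) := by
            simp only [pvAddA, hlk]
            rw [if_neg hcb]
          simp only [pvRunB]
          rw [if_neg hcb, hlk]
          show pvRunB entries k ((d, pvDeps e) :: (id, rest) :: stk)
              ⟨st.expanded, st.missing, PySem.Set.add st.seen d⟩ = _
          -- outer IH at fuel k on the pushed frame
          rw [ihn d (pvDeps e) ((id, rest) :: stk) ⟨st.expanded, st.missing, PySem.Set.add st.seen d⟩ (by omega)]
          set stB : PvSt :=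
            (let st2 := (pvDeps e).foldl (fun s d => pvAddA entries k d s)
                  ⟨st.expanded, st.missing, PySem.Set.add st.seen d⟩
             (⟨st2.expanded ++ [d], st2.missing, st2.seen⟩ : PvSt)) with hstB
          have hmono : pvC entries stB ≤ pvC entries ⟨st.expanded, st.missing, PySem.Set.add st.seen d⟩ := by
            apply pvC_anti
            intro x hx
            exact pvFold_seen_mono entries k (fun i s0 y hy => pvAddA_seen_mono entries k i s0 y hy)
              (pvDeps e) _ x hx
          rw [pvRunB_adeq entries k ((id, rest) :: stk) stB (k + 1) (by omega) (by omega)]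
          rw [ihd stB (by omega)]
          simp only [List.foldl_cons, hstep]

theorem pvFold_adeq (entries : List (String × List (String × List String))) (n m : Nat) :
    ∀ (deps : List String) (st : PvSt), pvC entries st + 1 ≤ n → pvC entries st + 1 ≤ m →
      deps.foldl (fun s d => pvAddA entries n d s) st = deps.foldl (fun s d => pvAddA entries m d s) st := by
  intro deps
  induction deps with
  | nil => intros; rfl
  | cons d rest ihd =>
    intro st h1 h2
    simp only [List.foldl_cons]
    rw [← pvAddA_adeq entries n m d st h1 h2]
    have hle := pvC_anti_addA entries n d st
    exact ihd _ (by omega) (by omega)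

-- ===== VERDICT (by name: the statement is the Claim_ definition above) =====
theorem expand_deps_py_spec : Claim_equal_expand_deps_py := by
  intro case_id entries _
  show expand_deps_py case_id entries = expand_deps_py_alt case_id entries
  simp only [expand_deps_py, expand_deps_py_alt]
  cases hlk : pvLookup entries case_id with
  | none => simp [pvAddA, hlk, PySem.Set.empty]
  | some e =>
    have hc0 : pvC entries ⟨[], [], PySem.Set.empty⟩ ≤ entries.length := by
      unfold pvC
      calc ((entries.map Prod.fst).toFinset \ (PySem.Set.empty : PySem.Set String).toFinset).card
          ≤ (entries.map Prod.fst).toFinset.card := Finset.card_le_card Finset.sdiff_subset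
        _ ≤ (entries.map Prod.fst).length := List.toFinset_card_le _
        _ = entries.length := by simp
    have hkey : case_id ∈ entries.map Prod.fst := pvLookup_mem_keys hlk
    have hlt : pvC entries ⟨([] : List String), ([] : List String), PySem.Set.add PySem.Set.empty case_id⟩
        < pvC entries ⟨[], [], PySem.Set.empty⟩ := by
      have := pvC_add_lt entries ⟨[], [], PySem.Set.empty⟩ hkey (by simp [PySem.Set.empty])
      simpa using this
    have hA : pvAddA entries (entries.length + 1) case_id ⟨[], [], PySem.Set.empty⟩
        = (let st2 := (pvDeps e).foldl (fun s d => pvAddA entries entries.length d s)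
              ⟨[], [], PySem.Set.add PySem.Set.empty case_id⟩
           (⟨st2.expanded ++ [case_id], st2.missing, st2.seen⟩ : PvSt)) := by
      simp [pvAddA, hlk, PySem.Set.empty]
    rw [hA]
    show _ = ((pvRunB entries (entries.length + 1) [(case_id, pvDeps e)]
          ⟨[], [], PySem.Set.empty.add case_id⟩).expanded,
        PySem.List.sorted (PySem.Set.ofList (pvRunB entries (entries.length + 1) [(case_id, pvDeps e)]
          ⟨[], [], PySem.Set.empty.add case_id⟩).missing) (fun x => x) false)
    rw [pvBridge entries (entries.length + 1) case_id (pvDeps e) []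
        ⟨[], [], PySem.Set.add PySem.Set.empty case_id⟩ (by omega)]
    simp only [pvRunB]
    rw [pvFold_adeq entries entries.length (entries.length + 1) (pvDeps e)
        ⟨[], [], PySem.Set.add PySem.Set.empty case_id⟩ (by omega) (by omega)]
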